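-- pv_equiv track=rewrite | github.com/codevoyage/USACO-python-2023 | section2/section 2.2/runround.py | is_runround
-- ===== SOURCE A (Python) =====
-- def is_runround(num):
--     num_str = str(num)
--     num_len = len(num_str)
--     visited = set()
--
--     current = 0
--
--     while current not in visited:
--         visited.add(current)
--         current = (int(num_str[current]) + current) % num_len
--
--     return len(visited) == num_len and current == 0
-- ===== SOURCE B (Python) =====
-- def is_runround(num):
--     num_str = str(num)
--     num_len = len(num_str)
--     pos = 0
--     for step in range(1, num_len + 1):
--         pos = (pos + int(num_str[pos])) % num_len
--         if pos == 0:
--             return step == num_len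
--     return False
-- ===== Notes on version B (the rewrite author's own statement) =====
-- stated objective: simpler
-- what changed: Drops A's visited-set bookkeeping entirely: B walks at most num_len steps and returns whether the cursor's first return to the starting position happens at exactly step num_len (a first-return-time characterisation of runround numbers), using constant extra space and early-returning at that first return.
import Mathlib
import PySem

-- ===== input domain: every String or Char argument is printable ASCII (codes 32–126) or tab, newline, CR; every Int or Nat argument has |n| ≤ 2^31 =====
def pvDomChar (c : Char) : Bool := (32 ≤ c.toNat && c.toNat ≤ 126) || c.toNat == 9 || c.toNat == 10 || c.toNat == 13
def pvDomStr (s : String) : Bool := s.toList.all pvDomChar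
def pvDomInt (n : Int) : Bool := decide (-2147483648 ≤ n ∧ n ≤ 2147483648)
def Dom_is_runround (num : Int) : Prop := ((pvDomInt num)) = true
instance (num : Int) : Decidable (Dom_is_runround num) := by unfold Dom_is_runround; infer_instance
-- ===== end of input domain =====

-- B drops A's visited-set bookkeeping: it walks at most num_len steps and returns whether the
-- cursor's first return to the starting position happens at exactly step num_len;
-- equivalence proved on non-negative inputs (on negative num both A and B raise ValueError at int('-')).

-- ===== PORT A =====
-- int(num_str[i]) : none exactly where Python raises IndexError / ValueError (occurs in both sources)
def isrrDigit (s : List Char) (i : Int) : Option Int :=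
  match PySem.List.pyGet? s i with
  | none => none
  | some ch => PySem.Int.ofChars? [ch]

-- A's while loop; the fuel argument only makes it total (proved never exhausted under Pre_)
def isrrLoopA (s : List Char) (L : Int) : Nat → PySem.Set Int → Int → Option (PySem.Set Int × Int)
  | 0, _, _ => none
  | fuel+1, visited, current =>
    if PySem.Set.contains visited current then some (visited, current)
    else
      match isrrDigit s current with
      | none => none
      | some d => isrrLoopA s L fuel (PySem.Set.add visited current) (PySem.Int.mod (d + current) L)

def is_runround (num : Int) : Bool :=
  let numStr := PySem.Int.toChars num
  let numLen : Int := numStr.length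
  match isrrLoopA numStr numLen (numStr.length + 1) PySem.Set.empty 0 with
  | none => false   -- a Python exception; outside Pre_
  | some (visited, current) => decide (PySem.Set.len visited = numLen) && decide (current = 0)

-- ===== PORT B =====
-- B's for-loop over range(1, num_len + 1): step, early-return on the cursor's first return
def isrrLoopB (s : List Char) (L : Int) : List Int → Int → Option Bool
  | [], _ => some false
  | step :: rest, pos =>
    match isrrDigit s pos with
    | none => none
    | some d =>
      let pos' := PySem.Int.mod (pos + d) L
      if pos' = 0 then some (decide (step = L)) else isrrLoopB s L rest pos'

def is_runround_alt (num : Int) : Bool :=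
  let numStr := PySem.Int.toChars num
  let numLen : Int := numStr.length
  match isrrLoopB numStr numLen (PySem.List.pyRange 1 (numLen + 1) 1) 0 with
  | none => false   -- a Python exception; outside Pre_
  | some b => b

-- ===== PRECONDITION & SPEC =====
-- On negative num, str(num) starts with '-' and int('-') raises ValueError in both A and B.
def Pre_is_runround (num : Int) : Prop := 0 ≤ num
instance (num : Int) : Decidable (Pre_is_runround num) := by unfold Pre_is_runround; infer_instance
def pvWitness_is_runround : Int := (13)
def Spec_is_runround (num : Int) (out : Bool) : Prop := out = is_runround_alt num
instance (num : Int) (out : Bool) : Decidable (Spec_is_runround num out) := by unfold Spec_is_runround; infer_instance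

-- ===== CLAIM (what is proved, stated in full; the proofs are below) =====
def Claim_equal_is_runround : Prop := ∀ (num : Int), Dom_is_runround num → Pre_is_runround num → Spec_is_runround num (is_runround num)

-- ===== LEMMAS AND PROOFS =====

-- the common step function: current ↦ (int(num_str[current]) + current) % num_len
def isrrF (s : List Char) (L : Int) (c : Int) : Int :=
  PySem.Int.mod ((isrrDigit s c).getD 0 + c) L

lemma isrrDigit_of_digitChar (c : Char)
    (hc : c ∈ ['0','1','2','3','4','5','6','7','8','9']) :
    (PySem.Int.ofChars? [c]).isSome := by
  fin_cases hc <;> rfl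

lemma toDigitsCore_chars (b : Nat) : ∀ (fuel n : Nat) (ds : List Char), b = 10 →
    (∀ c ∈ ds, c ∈ ['0','1','2','3','4','5','6','7','8','9']) →
    ∀ c ∈ Nat.toDigitsCore b fuel n ds, c ∈ ['0','1','2','3','4','5','6','7','8','9'] := by
  intro fuel
  induction fuel with
  | zero => intro n ds _ hds; simpa [Nat.toDigitsCore] using hds
  | succ fuel ih =>
    intro n ds hb hds c hc
    have hd : Nat.digitChar (n % b) ∈ ['0','1','2','3','4','5','6','7','8','9'] := by
      subst hb
      have hm : n % 10 < 10 := Nat.mod_lt _ (by omega)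
      interval_cases h : n % 10 <;> decide
    rw [Nat.toDigitsCore] at hc
    by_cases h0 : n / b = 0
    · rw [if_pos h0] at hc
      rcases List.mem_cons.mp hc with hc2 | hc2
      · simpa [hc2] using hd
      · exact hds _ hc2
    · rw [if_neg h0] at hc
      refine ih (n / b) _ hb ?_ c hc
      intro c' hc'
      rcases List.mem_cons.mp hc' with hc2 | hc2
      · simpa [hc2] using hd
      · exact hds _ hc2

lemma toDigits_chars (n : Nat) :
    ∀ c ∈ Nat.toDigits 10 n, c ∈ ['0','1','2','3','4','5','6','7','8','9'] :=
  toDigitsCore_chars 10 (n+1) n [] rfl (by simp)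

lemma toDigitsCore_length_le (b : Nat) : ∀ (fuel n : Nat) (ds : List Char),
    ds.length ≤ (Nat.toDigitsCore b fuel n ds).length := by
  intro fuel
  induction fuel with
  | zero => intro n ds; simp [Nat.toDigitsCore]
  | succ fuel ih =>
    intro n ds
    rw [Nat.toDigitsCore]
    by_cases h0 : n / b = 0
    · simp [h0]
    · simp only [if_neg h0]
      calc ds.length ≤ (Nat.digitChar (n % b) :: ds).length := by simp
        _ ≤ _ := ih _ _

lemma toDigits_ne_nil (n : Nat) : Nat.toDigits 10 n ≠ [] := by
  unfold Nat.toDigits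
  rw [Nat.toDigitsCore]
  by_cases h0 : n / 10 = 0
  · simp [h0]
  · rw [if_neg h0]
    intro h
    have hlen := toDigitsCore_length_le 10 n (n/10) [Nat.digitChar (n % 10)]
    rw [h] at hlen; simp at hlen

lemma toChars_nonneg (num : Int) (h : 0 ≤ num) :
    PySem.Int.toChars num = Nat.toDigits 10 num.toNat := by
  simp [PySem.Int.toChars, not_lt.mpr h]

-- digit lookup succeeds at every in-range index of str(num), num ≥ 0
lemma isrrDigit_isSome (num : Int) (h : 0 ≤ num) (i : Int)
    (h0 : 0 ≤ i) (h1 : i < (PySem.Int.toChars num).length) :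
    (isrrDigit (PySem.Int.toChars num) i).isSome := by
  have hlt : i.toNat < (PySem.Int.toChars num).length := by omega
  have h2 : PySem.List.pyGet? (PySem.Int.toChars num) i = (PySem.Int.toChars num)[i.toNat]? := by
    rw [show i = ((i.toNat : Nat) : Int) by omega, PySem.List.pyGet?_natCast]
    simp
    rw [max_eq_left h0]
  obtain ⟨c, hget, hmem⟩ :
      ∃ c, PySem.List.pyGet? (PySem.Int.toChars num) i = some c ∧ c ∈ PySem.Int.toChars num :=
    ⟨(PySem.Int.toChars num)[i.toNat], h2.trans (List.getElem?_eq_getElem hlt),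
      List.getElem_mem hlt⟩
  rw [toChars_nonneg num h] at hmem
  rw [isrrDigit, hget]
  exact isrrDigit_of_digitChar _ (toDigits_chars num.toNat _ hmem)

-- the step keeps current in [0, L)
lemma isrrF_range (s : List Char) (L : Int) (hL : 0 < L) (c : Int) :
    0 ≤ isrrF s L c ∧ isrrF s L c < L :=
  ⟨PySem.Int.mod_nonneg _ hL, PySem.Int.mod_lt _ hL⟩

-- every trajectory value lies in [0, L)
lemma isrrTraj_range (s : List Char) (L : Int) (hL : 0 < L) :
    ∀ i : Nat, 0 ≤ (isrrF s L)^[i] 0 ∧ (isrrF s L)^[i] 0 < L := by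
  intro i
  induction i with
  | zero => exact ⟨le_refl 0, hL⟩
  | succ i _ => rw [Function.iterate_succ_apply']; exact isrrF_range s L hL _

-- invariant of A's loop: starting from a distinct in-range prefix it returns the extended
-- distinct trajectory prefix together with the first repeated value
lemma loopA_run (s : List Char) (L : Int) (hL : 0 < L)
    (hd : ∀ i, 0 ≤ i → i < L → (isrrDigit s i).isSome) :
    ∀ (fuel : Nat) (pos : List Int) (current : Int),
      pos.Nodup → (∀ x ∈ pos, 0 ≤ x ∧ x < L) → 0 ≤ current → current < L →
      L.toNat + 1 - pos.length ≤ fuel →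
      ∃ k, isrrLoopA s L fuel pos current =
            some (pos ++ (List.range k).map (fun i => (isrrF s L)^[i] current),
                  (isrrF s L)^[k] current)
        ∧ (pos ++ (List.range k).map (fun i => (isrrF s L)^[i] current)).Nodup
        ∧ (isrrF s L)^[k] current ∈ pos ++ (List.range k).map (fun i => (isrrF s L)^[i] current) := by
  intro fuel
  induction fuel with
  | zero =>
    intro pos current hnd hrange _ _ hfuel
    exfalso
    have hsub : pos ⊆ PySem.List.pyRange 0 L 1 := by
      intro x hx
      rw [PySem.List.mem_pyRange_one]
      exact ⟨(hrange x hx).1, (hrange x hx).2⟩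
    have hle : pos.length ≤ (PySem.List.pyRange 0 L 1).length :=
      (List.subperm_of_subset hnd hsub).length_le
    rw [PySem.List.length_pyRange_one] at hle
    omega
  | succ fuel ih =>
    intro pos current hnd hrange hc0 hc1 hfuel
    by_cases hmem : current ∈ pos
    · refine ⟨0, ?_, by simpa using hnd, by simpa using hmem⟩
      rw [isrrLoopA]
      have : PySem.Set.contains pos current = true := by
        simp [PySem.Set.contains, hmem]
      rw [if_pos this]
      simp
    · obtain ⟨d, hdd⟩ := Option.isSome_iff_exists.mp (hd current hc0 hc1)
      have hcont : PySem.Set.contains pos current = false := by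
        simpa [PySem.Set.contains] using hmem
      have hf : isrrF s L current = PySem.Int.mod (d + current) L := by
        simp [isrrF, hdd]
      have hadd : PySem.Set.add pos current = pos ++ [current] := by
        unfold PySem.Set.add
        rw [hcont]
        simp
      have hstep : isrrLoopA s L (fuel+1) pos current =
          isrrLoopA s L fuel (pos ++ [current]) (PySem.Int.mod (d + current) L) := by
        simp only [isrrLoopA, hcont, Bool.false_eq_true, if_false, hdd, hadd]
      have hnd' : (pos ++ [current]).Nodup := by
        simp [List.nodup_append, hnd]
        intro a ha heq
        exact hmem (heq ▸ ha)
      have hrange' : ∀ x ∈ pos ++ [current], 0 ≤ x ∧ x < L := by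
        intro x hx
        rcases List.mem_append.mp hx with hx | hx
        · exact hrange x hx
        · simp at hx; subst hx; exact ⟨hc0, hc1⟩
      obtain ⟨k, heq, hknd, hkmem⟩ :=
        ih (pos ++ [current]) (PySem.Int.mod (d + current) L) hnd' hrange'
          (PySem.Int.mod_nonneg _ hL) (PySem.Int.mod_lt _ hL) (by simp; omega)
      have hsplit : pos ++ (List.range (k+1)).map (fun i => (isrrF s L)^[i] current)
          = (pos ++ [current]) ++ (List.range k).map (fun i => (isrrF s L)^[i] (PySem.Int.mod (d + current) L)) := by
        rw [List.range_succ_eq_map]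
        simp [Function.comp_def, Function.iterate_succ_apply, hf, List.append_assoc]
      refine ⟨k + 1, ?_, ?_, ?_⟩
      · rw [hstep, heq, Function.iterate_succ_apply, hf, hsplit]
      · rw [hsplit]; exact hknd
      · rw [Function.iterate_succ_apply, hf, hsplit]; exact hkmem

lemma nodup_subset_length {xs ys : List Int} (h1 : xs.Nodup) (h2 : xs ⊆ ys) :
    xs.length ≤ ys.length :=
  (List.subperm_of_subset h1 h2).length_le

-- a nodup trajectory prefix has at most L.toNat entries
lemma isrrTraj_len_le (s : List Char) (L : Int) (hL : 0 < L) (k : Nat)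
    (hnd : ((List.range k).map (fun i => (isrrF s L)^[i] 0)).Nodup) : k ≤ L.toNat := by
  have hsub : ((List.range k).map (fun i => (isrrF s L)^[i] 0)) ⊆ PySem.List.pyRange 0 L 1 := by
    intro x hx
    obtain ⟨i, _, hi⟩ := List.mem_map.mp hx
    rw [PySem.List.mem_pyRange_one, ← hi]
    exact isrrTraj_range s L hL i
  have hle := nodup_subset_length hnd hsub
  rw [PySem.List.length_pyRange_one] at hle
  simpa using hle

-- B's loop computes the first-return-time predicate
lemma loopB_run (s : List Char) (L : Int) (hL : 0 < L)
    (hd : ∀ i, 0 ≤ i → i < L → (isrrDigit s i).isSome) :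
    ∀ (c m : Nat), m + c = L.toNat →
      (∀ j : Nat, 0 < j → j ≤ m → (isrrF s L)^[j] 0 ≠ 0) →
      isrrLoopB s L (PySem.List.pyRange ((m : Int) + 1) (L + 1) 1) ((isrrF s L)^[m] 0) =
        some (decide ((isrrF s L)^[L.toNat] 0 = 0 ∧
          ∀ j < L.toNat, 0 < j → (isrrF s L)^[j] 0 ≠ 0)) := by
  intro c
  induction c with
  | zero =>
    intro m hm hno
    have hm' : (m : Int) = L := by omega
    rw [PySem.List.pyRange_one_eq_nil (by omega)]
    have : ¬ ((isrrF s L)^[L.toNat] 0 = 0 ∧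
        ∀ j < L.toNat, 0 < j → (isrrF s L)^[j] 0 ≠ 0) := by
      rintro ⟨h1, _⟩
      exact hno L.toNat (by omega) (by omega) h1
    simp only [isrrLoopB]
    rw [decide_eq_false this]
  | succ c ih =>
    intro m hm hno
    have hmlt : (m : Int) + 1 < L + 1 := by omega
    rw [PySem.List.pyRange_one_cons hmlt]
    have hpos := isrrTraj_range s L hL m
    obtain ⟨d, hdd⟩ := Option.isSome_iff_exists.mp (hd _ hpos.1 hpos.2)
    have hstep : PySem.Int.mod ((isrrF s L)^[m] 0 + d) L = (isrrF s L)^[m+1] 0 := by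
      rw [Function.iterate_succ_apply', isrrF, hdd]
      simp [Int.add_comm]
    simp only [isrrLoopB, hdd, hstep]
    by_cases h0 : (isrrF s L)^[m+1] 0 = 0
    · rw [if_pos h0]
      congr 1
      by_cases hmn : m + 1 = L.toNat
      · have : ((m : Int) + 1 = L) := by omega
        simp only [this, decide_true]
        symm
        rw [decide_eq_true_iff]
        refine ⟨by rw [← hmn]; exact h0, ?_⟩
        intro j hj2 hj1
        exact hno j hj1 (by omega)
      · have : ¬ ((m : Int) + 1 = L) := by omega
        simp only [this, decide_false]
        symm
        rw [decide_eq_false_iff_not]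
        rintro ⟨_, h2⟩
        exact h2 (m+1) (by omega) (by omega) h0
    · rw [if_neg h0]
      have := ih (m+1) (by omega) (by
        intro j hj1 hj2
        rcases Nat.lt_or_ge j (m+1) with h | h
        · exact hno j hj1 (by omega)
        · have : j = m + 1 := by omega
          rw [this]; exact h0)
      simpa [Nat.cast_add, Nat.cast_one, add_assoc] using this

-- extract pairwise distinctness of trajectory values from nodup of the mapped prefix
lemma isrrTraj_inj_of_nodup (s : List Char) (L : Int) (n : Nat)
    (hnd : ((List.range n).map (fun i => (isrrF s L)^[i] 0)).Nodup)
    {i j : Nat} (hi : i < n) (hj : j < n) (hij : i ≠ j) :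
    (isrrF s L)^[i] 0 ≠ (isrrF s L)^[j] 0 := by
  intro heq
  set l := (List.range n).map (fun i => (isrrF s L)^[i] 0) with hl
  have hlen : l.length = n := by simp [hl]
  have hi' : i < l.length := by omega
  have hj' : j < l.length := by omega
  have hgi : l[i]'hi' = (isrrF s L)^[i] 0 := by simp [hl]
  have hgj : l[j]'hj' = (isrrF s L)^[j] 0 := by simp [hl]
  exact hij ((@List.Nodup.getElem_inj_iff _ l hnd i hi' j hj').mp (by rw [hgi, hgj]; exact heq))

-- ===== VERDICT (by name: the statement is the Claim_ definition above) =====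
theorem is_runround_spec : Claim_equal_is_runround := by
  intro num _ hpre
  unfold Spec_is_runround
  have hne : PySem.Int.toChars num ≠ [] := by
    rw [toChars_nonneg num hpre]; exact toDigits_ne_nil _
  have hL : 0 < ((PySem.Int.toChars num).length : Int) := by
    have := List.length_pos_of_ne_nil hne
    exact_mod_cast this
  have hd := isrrDigit_isSome num hpre
  obtain ⟨k, heqA, hknd, hkmem⟩ :=
    loopA_run (PySem.Int.toChars num) _ hL hd ((PySem.Int.toChars num).length + 1) [] 0
      List.nodup_nil (by simp) (le_refl 0) hL (by simp)
  simp only [List.nil_append] at heqA hknd hkmem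
  have heqB := loopB_run (PySem.Int.toChars num) _ hL hd ((PySem.Int.toChars num).length) 0
    (by simp) (by intro j h1 h2; omega)
  rw [is_runround, is_runround_alt]
  rw [show (PySem.Set.empty : PySem.Set Int) = ([] : List Int) from rfl]
  rw [heqA]
  simp only [Nat.cast_zero, zero_add, Function.iterate_zero_apply] at heqB
  rw [heqB]
  set f := isrrF (PySem.Int.toChars num) ((PySem.Int.toChars num).length : Int) with hfdef
  set n := (PySem.Int.toChars num).length with hndef
  have hnn : (((n : Int)).toNat) = n := by omega
  rw [hnn]
  have hkle : k ≤ n := by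
    have := isrrTraj_len_le (PySem.Int.toChars num) _ hL k hknd
    omega
  have hlen : PySem.Set.len ((List.range k).map (fun i => f^[i] 0)) = (k : Int) := by
    simp [PySem.Set.len]
  simp only [hlen]
  have hiff : ((k : Int) = (n : Int) ∧ f^[k] 0 = 0) ↔
      (f^[n] 0 = 0 ∧ ∀ j < n, 0 < j → f^[j] 0 ≠ 0) := by
    constructor
    · rintro ⟨hk, h0⟩
      have hk' : k = n := by omega
      refine ⟨hk' ▸ h0, ?_⟩
      intro j hj2 hj1
      have hne0 := isrrTraj_inj_of_nodup _ _ k hknd (i := j) (j := 0) (by omega) (by omega) (by omega)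
      simpa using hne0
    · rintro ⟨h0, hno⟩
      have hn0 : 0 < n := by omega
      have hk' : k = n := by
        by_contra hkn
        have hklt : k < n := lt_of_le_of_ne hkle hkn
        obtain ⟨i, hi, hie⟩ := List.mem_map.mp hkmem
        rw [List.mem_range] at hi
        have hchain : f^[n] 0 = f^[(n - k) + i] 0 := by
          have h1 : f^[n] 0 = f^[n - k] (f^[k] 0) := by
            rw [← Function.iterate_add_apply]
            congr 1
            omega
          rw [h1, ← hie, ← Function.iterate_add_apply]
        have hj0 : f^[(n - k) + i] 0 = 0 := by rw [← hchain]; exact h0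
        exact hno ((n - k) + i) (by omega) (by omega) hj0
      subst hk'
      exact ⟨by omega, h0⟩
  by_cases hcase : f^[n] 0 = 0 ∧ ∀ j < n, 0 < j → f^[j] 0 ≠ 0
  · have := hiff.mpr hcase
    rw [decide_eq_true hcase]
    simp [this.1, this.2]
  · have : ¬ ((k : Int) = (n : Int) ∧ f^[k] 0 = 0) := fun h => hcase (hiff.mp h)
    rw [decide_eq_false hcase]
    rcases Decidable.not_and_iff_not_or_not.mp this with h | h <;> simp [h]
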